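-- pv_equiv track=rewrite | github.com/123owq/util | extract_v4.py | table_to_records
-- ===== SOURCE A (Python) =====
-- def table_to_records(table: list[list[str]]) -> list[dict]:
--     if not table or len(table) < 2:
--         return []
--     headers = table[0]
--     return [
--         {(h or f"col{i}"): v for i, (h, v) in enumerate(zip(headers, row))}
--         for row in table[1:]
--     ]
-- ===== SOURCE B (Python) =====
-- def table_to_records(table: list[list[str]]) -> list[dict]:
--     if len(table) < 2:
--         return []
--     rows = table[1:]
--     records = [{} for _ in rows]
--     for j, h in enumerate(table[0]):
--         key = h or f"col{j}"
--         for rec, row in zip(records, rows):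
--             if j < len(row):
--                 rec[key] = row[j]
--     return records
-- ===== Notes on version B (the rewrite author's own statement) =====
-- stated objective: alternative
-- what changed: B builds the records column-by-column: it initializes one empty dict per data row, then iterates over header columns once, resolving each key ('h or col{j}') a single time and writing that column's value into every record, instead of A's row-by-row nested comprehension that re-derives keys per row.
import Mathlib
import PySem

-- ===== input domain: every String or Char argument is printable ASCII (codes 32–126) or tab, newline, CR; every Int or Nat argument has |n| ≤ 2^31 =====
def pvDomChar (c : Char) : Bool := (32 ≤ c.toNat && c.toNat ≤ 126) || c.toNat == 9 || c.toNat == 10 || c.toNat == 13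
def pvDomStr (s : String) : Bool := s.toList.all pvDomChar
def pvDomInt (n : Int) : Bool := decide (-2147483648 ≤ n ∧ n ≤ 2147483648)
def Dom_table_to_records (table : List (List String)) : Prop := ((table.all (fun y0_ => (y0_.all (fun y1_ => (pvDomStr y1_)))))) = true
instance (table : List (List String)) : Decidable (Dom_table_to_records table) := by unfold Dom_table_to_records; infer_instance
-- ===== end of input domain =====

-- B builds the records column by column: one outer loop over the header columns, an inner
-- pass writing that column's value into every record dict; objective: alternative (same cost).

-- ===== PORT A =====
def table_to_records (table : List (List String)) : List (List (String × String)) :=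
  if table = [] ∨ table.length < 2 then []
  else
    let headers := table.headD []
    (table.drop 1).map (fun row =>
      (PySem.Dict.ofList ((PySem.List.enumerate (headers.zip row) 0).map
        (fun p => ((if p.2.1 = "" then "col" ++ PySem.Int.toStr p.1 else p.2.1), p.2.2)))).items)

-- ===== PORT B =====
def table_to_records_alt (table : List (List String)) : List (List (String × String)) :=
  if table.length < 2 then []
  else
    let rows := table.drop 1
    let records : List (PySem.Dict String String) := rows.map (fun _ => PySem.Dict.empty)
    let final := (PySem.List.enumerate (table.headD []) 0).foldl
      (fun recs p =>
        let key := if p.2 = "" then "col" ++ PySem.Int.toStr p.1 else p.2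
        (recs.zip rows).map (fun pr =>
          -- 'if j < len(row): rec[key] = row[j]' — j = p.1 ≥ 0 here, so pyGet? is some
          -- exactly when j < len(row); exact on that branch
          match PySem.List.pyGet? pr.2 p.1 with
          | some v => pr.1.insert key v
          | none => pr.1))
      records
    final.map (fun d => d.items)

-- ===== PRECONDITION & SPEC =====
def Spec_table_to_records (table : List (List String)) (out : List (List (String × String))) : Prop := out = table_to_records_alt table
instance (table : List (List String)) (out : List (List (String × String))) : Decidable (Spec_table_to_records table out) := by unfold Spec_table_to_records; infer_instance

-- ===== CLAIM (what is proved, stated in full; the proofs are below) =====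
def Claim_equal_table_to_records : Prop := ∀ (table : List (List String)), Dom_table_to_records table → Spec_table_to_records table (table_to_records table)

-- ===== LEMMAS AND PROOFS =====

-- zipping a mapped zip back against the same right list keeps the pairs aligned
theorem pv_zip_map_left_zip {α β γ : Type} (xs : List α) (ys : List β) (f : α × β → γ) :
    ((xs.zip ys).map f).zip ys = (xs.zip ys).map (fun p => (f p, p.2)) := by
  induction xs generalizing ys with
  | nil => simp
  | cons x xt ih =>
    cases ys with
    | nil => simp
    | cons y yt => simp [ih]

-- the column-wise fold acts on each (record, row) pair independently
theorem pv_fold_cols_pointwise (rows : List (List String))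
    (cols : List (Int × String)) :
    ∀ (recs : List (PySem.Dict String String)),
    cols.foldl
      (fun recs p =>
        let key := if p.2 = "" then "col" ++ PySem.Int.toStr p.1 else p.2
        (recs.zip rows).map (fun pr =>
          match PySem.List.pyGet? pr.2 p.1 with
          | some v => pr.1.insert key v
          | none => pr.1))
      recs
    = if cols = [] then recs else
      (recs.zip rows).map (fun pr =>
        cols.foldl (fun d p =>
          let key := if p.2 = "" then "col" ++ PySem.Int.toStr p.1 else p.2
          match PySem.List.pyGet? pr.2 p.1 with
          | some v => d.insert key v
          | none => d) pr.1) := by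
  induction cols with
  | nil => intro recs; simp
  | cons c ct ih =>
    intro recs
    simp only [List.foldl_cons, ih, if_neg (List.cons_ne_nil c ct)]
    by_cases hct : ct = []
    · subst hct; simp
    · simp only [if_neg hct, pv_zip_map_left_zip, List.map_map]
      rfl

-- pyGet? at a nonnegative index is head-of-drop
theorem pv_pyGet?_nonneg {α : Type} (xs : List α) (s : Nat) :
    PySem.List.pyGet? xs (s : Int) = (xs.drop s).head? := by
  simp [List.head?_drop]

-- zipping a constant map against its source pairs the constant with each element
theorem pv_zip_map_const {α β : Type} (xs : List α) (c : β) :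
    (xs.map (fun _ => c)).zip xs = xs.map (fun x => (c, x)) := by
  induction xs with
  | nil => simp
  | cons x xt ih => simp only [List.map_cons, List.zip_cons_cons, ih]

-- Dict.ofList is the insert fold (definitional)
theorem pv_ofList_eq_foldl (ps : List (String × String)) :
    PySem.Dict.ofList ps = ps.foldl (fun d p => d.insert p.1 p.2) PySem.Dict.empty := rfl

-- the per-row column fold builds exactly the dict A's comprehension builds
theorem pv_rowfold (row : List String) :
    ∀ (hs : List String) (s : Nat) (d : PySem.Dict String String),
    (PySem.List.enumerate hs (s : Int)).foldl
      (fun d p =>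
        let key := if p.2 = "" then "col" ++ PySem.Int.toStr p.1 else p.2
        match PySem.List.pyGet? row p.1 with
        | some v => d.insert key v
        | none => d) d
    = ((PySem.List.enumerate (hs.zip (row.drop s)) (s : Int)).map
        (fun p => ((if p.2.1 = "" then "col" ++ PySem.Int.toStr p.1 else p.2.1), p.2.2))).foldl
        (fun d q => d.insert q.1 q.2) d := by
  intro hs
  induction hs with
  | nil => intro s d; simp [PySem.List.enumerate_nil]
  | cons h t ih =>
    intro s d
    have hget : PySem.List.pyGet? row (s : Int) = (row.drop s).head? := pv_pyGet?_nonneg row s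
    cases hdrop : row.drop s with
    | nil =>
      have hnext : row.drop (s + 1) = [] := by
        rw [← List.drop_drop]; simp [hdrop]
      simp only [PySem.List.enumerate_cons, List.foldl_cons, hget, hdrop, List.head?_nil,
        List.zip_nil_right, PySem.List.enumerate_nil, List.map_nil, List.foldl_nil]
      have := ih (s + 1) d
      rw [show ((s : Int) + 1) = ((s + 1 : Nat) : Int) by push_cast; ring]
      rw [this, hnext]
      simp [PySem.List.enumerate_nil]
    | cons v rest =>
      have hnext : row.drop (s + 1) = rest := by
        rw [← List.drop_drop]; simp [hdrop]
      simp only [PySem.List.enumerate_cons, List.foldl_cons, hget, hdrop, List.head?_cons,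
        List.zip_cons_cons, List.map_cons]
      rw [show ((s : Int) + 1) = ((s + 1 : Nat) : Int) by push_cast; ring]
      rw [ih (s + 1), hnext]

-- ===== VERDICT (by name: the statement is the Claim_ definition above) =====
theorem table_to_records_spec : Claim_equal_table_to_records := by
  intro table _
  unfold Spec_table_to_records table_to_records table_to_records_alt
  by_cases h : table.length < 2
  · rw [if_pos (Or.inr h), if_pos h]
  · have hne : ¬ (table = [] ∨ table.length < 2) := by
      rintro (rfl | hlt)
      · exact h (by simp)
      · exact h hlt
    simp only [if_neg hne, if_neg h]
    rw [pv_fold_cols_pointwise]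
    by_cases hcols : PySem.List.enumerate (table.headD []) (0 : Int) = []
    · have hhd : table.headD [] = [] := by
        cases hh : table.headD [] with
        | nil => rfl
        | cons a b => rw [hh] at hcols; simp [PySem.List.enumerate_cons] at hcols
      rw [if_pos hcols]
      simp only [hhd, List.zip_nil_left, PySem.List.enumerate_nil, List.map_nil, List.map_map]
      refine List.map_congr_left (fun row _ => ?_)
      rfl
    · rw [if_neg hcols]
      rw [pv_zip_map_const]
      simp only [List.map_map]
      refine List.map_congr_left (fun row _ => ?_)
      simp only [Function.comp_def]
      rw [show (0 : Int) = ((0 : Nat) : Int) from rfl, pv_rowfold]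
      rw [pv_ofList_eq_foldl]
      simp
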